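-- pv_equiv track=rewrite | github.com/Adriwin06/libatlas | tools/fixture_pipeline_ui/main.py | _derive_assignments
-- ===== SOURCE A (Python) =====
-- def _derive_assignments(
--
--     members: list[object],
--     decision: dict[str, object],
-- ) -> tuple[dict[str, int], set[str]]:
--     logical_ids = [
--         member.get("logical_id")
--         for member in members
--         if isinstance(member, dict) and isinstance(member.get("logical_id"), str)
--     ]
--     aliases = decision.get("aliases")
--     if not isinstance(aliases, dict):
--         aliases = {}
--
--     parent: dict[str, str] = {logical_id: logical_id for logical_id in logical_ids}
--
--     def find(value: str) -> str:
--         root = parent.setdefault(value, value)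
--         if root != value:
--             parent[value] = find(root)
--         return parent[value]
--
--     def union(left: str, right: str) -> None:
--         left_root = find(left)
--         right_root = find(right)
--         if left_root != right_root:
--             parent[right_root] = left_root
--
--     winners: set[str] = set()
--     for loser_logical_id, winner_logical_id in aliases.items():
--         if loser_logical_id in parent and winner_logical_id in parent:
--             union(loser_logical_id, winner_logical_id)
--             winners.add(winner_logical_id)
--
--     grouped: dict[str, list[str]] = {}
--     for logical_id in logical_ids:
--         grouped.setdefault(find(logical_id), []).append(logical_id)
--
--     sorted_clusters = sorted((sorted(cluster) for cluster in grouped.values()), key=lambda cluster: cluster[0])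
--     assignments: dict[str, int] = {}
--     normalized_winners: set[str] = set()
--     for cluster_index, cluster in enumerate(sorted_clusters, start=1):
--         cluster_winner = next((logical_id for logical_id in cluster if logical_id in winners), cluster[0])
--         normalized_winners.add(cluster_winner)
--         for logical_id in cluster:
--             assignments[logical_id] = cluster_index
--
--     return assignments, normalized_winners
-- ===== SOURCE B (Python) =====
-- def _derive_assignments(
--     members: list[object],
--     decision: dict[str, object],
-- ) -> tuple[dict[str, int], set[str]]:
--     logical_ids = [
--         member.get("logical_id")
--         for member in members
--         if isinstance(member, dict) and isinstance(member.get("logical_id"), str)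
--     ]
--     aliases = decision.get("aliases")
--     aliases = aliases if isinstance(aliases, dict) else {}
--
--     # eager-relabelling representative map instead of a lazy union-find forest
--     rep = {logical_id: logical_id for logical_id in logical_ids}
--     winners: set[str] = set()
--     for loser_logical_id, winner_logical_id in aliases.items():
--         if loser_logical_id in rep and winner_logical_id in rep:
--             left_rep = rep[loser_logical_id]
--             right_rep = rep[winner_logical_id]
--             if left_rep != right_rep:
--                 rep = {k: (left_rep if v == right_rep else v) for k, v in rep.items()}
--             winners.add(winner_logical_id)
--
--     grouped: dict[str, list[str]] = {}
--     for logical_id in logical_ids: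
--         grouped.setdefault(rep[logical_id], []).append(logical_id)
--
--     sorted_clusters = sorted((sorted(cluster) for cluster in grouped.values()), key=lambda cluster: cluster[0])
--     assignments = {
--         logical_id: cluster_index
--         for cluster_index, cluster in enumerate(sorted_clusters, start=1)
--         for logical_id in cluster
--     }
--     normalized_winners = {
--         next((logical_id for logical_id in cluster if logical_id in winners), cluster[0])
--         for cluster in sorted_clusters
--     }
--     return assignments, normalized_winners
-- ===== Notes on version B (the rewrite author's own statement) =====
-- stated objective: alternative
-- what changed: A clusters logical ids with a recursive path-compressing union-find forest; B instead keeps a flat representative map and, for each valid alias edge, eagerly relabels every entry of the losing class, then groups by direct lookup; B's tail uses enumerate/dict- and set-comprehensions instead of A's mutating loops.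
import Mathlib
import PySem

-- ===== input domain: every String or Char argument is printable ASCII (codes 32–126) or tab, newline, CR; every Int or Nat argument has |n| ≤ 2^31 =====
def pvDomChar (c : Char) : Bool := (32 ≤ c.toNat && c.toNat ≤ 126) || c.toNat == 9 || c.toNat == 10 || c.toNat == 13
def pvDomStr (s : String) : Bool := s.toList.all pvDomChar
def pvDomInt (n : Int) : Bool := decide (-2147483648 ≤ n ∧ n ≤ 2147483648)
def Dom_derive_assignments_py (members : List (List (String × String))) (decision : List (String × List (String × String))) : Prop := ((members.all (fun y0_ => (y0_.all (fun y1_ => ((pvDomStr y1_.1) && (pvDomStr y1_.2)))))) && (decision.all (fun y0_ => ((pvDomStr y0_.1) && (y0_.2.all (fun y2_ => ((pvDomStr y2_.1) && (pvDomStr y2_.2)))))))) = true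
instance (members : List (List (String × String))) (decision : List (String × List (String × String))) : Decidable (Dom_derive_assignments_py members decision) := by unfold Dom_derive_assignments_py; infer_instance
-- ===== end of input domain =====

-- B replaces A's lazy path-compressing union-find forest by an eagerly relabelled
-- representative map (no recursion, no parent trees); objective: alternative.

-- ===== PORT A =====
-- shared transliterations of Python lines that are textually identical in A and B:
-- [member.get("logical_id") for member in members if isinstance(member, dict) and isinstance(member.get("logical_id"), str)]
-- (members are typed dicts of strings here, so the isinstance tests are key-presence tests)
def pvLogicalIds (members : List (List (String × String))) : List String :=
  members.filterMap (fun member => PySem.Dict.get? (PySem.Dict.mk member) "logical_id")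

-- aliases = decision.get("aliases"); if not isinstance(aliases, dict): aliases = {}
def pvAliases (decision : List (String × List (String × String))) : PySem.Dict String String :=
  match PySem.Dict.get? (PySem.Dict.mk decision) "aliases" with
  | some a => PySem.Dict.mk a
  | none => PySem.Dict.mk []

-- {logical_id: logical_id for logical_id in logical_ids}
def pvInitMap (lids : List String) : PySem.Dict String String :=
  lids.foldl (fun d lid => PySem.Dict.insert d lid lid) (PySem.Dict.mk [])

-- grouped.setdefault(key, []).append(logical_id)
def pvGroupAdd (g : PySem.Dict String (List String)) (r : String) (lid : String) :
    PySem.Dict String (List String) :=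
  match PySem.Dict.get? g r with
  | some c => PySem.Dict.insert g r (c ++ [lid])
  | none => PySem.Dict.insert g r [lid]

-- sorted((sorted(cluster) for cluster in clusters), key=lambda cluster: cluster[0])
-- (clusters are nonempty, so cluster[0] never raises; headD "" is exact here)
def pvSortClusters (clusters : List (List String)) : List (List String) :=
  PySem.List.sorted (clusters.map (fun c => PySem.List.sorted c (fun x => x) false))
    (fun c => c.headD "") false

-- next((logical_id for logical_id in cluster if logical_id in winners), cluster[0])
def pvWinnerSel (winners : PySem.Set String) (cluster : List String) : String :=
  (cluster.find? (fun lid => PySem.Set.contains winners lid)).getD (cluster.headD "")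

-- A's recursive find with path compression; fuel bounds the recursion depth
-- (the parent map is always an acyclic forest, so fuel p.size+1 is never exhausted)
def pvFindA : Nat → PySem.Dict String String → String → String × PySem.Dict String String
  | 0, p, value => (value, p)
  | (fuel+1), p, value =>
      let root := (PySem.Dict.get? p value).getD value
      let p1 := PySem.Dict.setdefault p value value
      if root = value then
        ((PySem.Dict.get? p1 value).getD value, p1)
      else
        let rp := pvFindA fuel p1 root
        let p2 := PySem.Dict.insert rp.2 value rp.1
        ((PySem.Dict.get? p2 value).getD value, p2)

def pvFind (p : PySem.Dict String String) (value : String) : String × PySem.Dict String String :=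
  pvFindA (p.size + 1) p value

def pvUnion (p : PySem.Dict String String) (left right : String) : PySem.Dict String String :=
  let a := pvFind p left
  let b := pvFind a.2 right
  if a.1 = b.1 then b.2 else PySem.Dict.insert b.2 b.1 a.1

-- the alias loop body of A: union + winners.add under the membership guard
def pvEdgeA (st : PySem.Dict String String × PySem.Set String) (e : String × String) :
    PySem.Dict String String × PySem.Set String :=
  if PySem.Dict.contains st.1 e.1 && PySem.Dict.contains st.1 e.2 then
    (pvUnion st.1 e.1 e.2, PySem.Set.add st.2 e.2)
  else st

-- the grouping loop body of A: find (mutating parent) then setdefault-append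
def pvGroupA (st : PySem.Dict String String × PySem.Dict String (List String)) (lid : String) :
    PySem.Dict String String × PySem.Dict String (List String) :=
  let rp := pvFind st.1 lid
  (rp.2, pvGroupAdd st.2 rp.1 lid)

-- the final loop of A: per cluster pick winner, add to set, assign index to every member
def pvTailA (winners : PySem.Set String)
    (st : PySem.Dict String Int × PySem.Set String × Int) (cluster : List String) :
    PySem.Dict String Int × PySem.Set String × Int :=
  (cluster.foldl (fun d lid => PySem.Dict.insert d lid st.2.2) st.1,
   PySem.Set.add st.2.1 (pvWinnerSel winners cluster), st.2.2 + 1)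

def derive_assignments_py (members : List (List (String × String))) (decision : List (String × List (String × String))) : (List (String × Int)) × List String :=
  let logical_ids := pvLogicalIds members
  let aliases := pvAliases decision
  let st := aliases.items.foldl pvEdgeA (pvInitMap logical_ids, PySem.Set.empty)
  let g := logical_ids.foldl pvGroupA (st.1, PySem.Dict.mk [])
  let sorted_clusters := pvSortClusters (PySem.Dict.values g.2)
  let fin := sorted_clusters.foldl (pvTailA st.2) (PySem.Dict.mk [], PySem.Set.empty, 1)
  (fin.1.items, fin.2.1)

-- ===== PORT B =====
-- the alias loop body of B: eager relabelling of the representative map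
-- (the dict comprehension {k: … for k, v in rep.items()} maps over the unique-keyed items list)
def pvEdgeB (st : PySem.Dict String String × PySem.Set String) (e : String × String) :
    PySem.Dict String String × PySem.Set String :=
  if PySem.Dict.contains st.1 e.1 && PySem.Dict.contains st.1 e.2 then
    let lrep := PySem.Dict.getD st.1 e.1 ""
    let rrep := PySem.Dict.getD st.1 e.2 ""
    let rep' := if lrep = rrep then st.1 else
      PySem.Dict.mk (st.1.items.map (fun kv => (kv.1, if kv.2 = rrep then lrep else kv.2)))
    (rep', PySem.Set.add st.2 e.2)
  else st

-- the grouping loop body of B: plain lookup of the precomputed representative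
-- (rep[logical_id]: the key is always present, so getD's default is never used)
def pvGroupB (rep : PySem.Dict String String) (g : PySem.Dict String (List String)) (lid : String) :
    PySem.Dict String (List String) :=
  pvGroupAdd g (PySem.Dict.getD rep lid "") lid

def derive_assignments_py_alt (members : List (List (String × String))) (decision : List (String × List (String × String))) : (List (String × Int)) × List String :=
  let logical_ids := pvLogicalIds members
  let aliases := pvAliases decision
  let st := aliases.items.foldl pvEdgeB (pvInitMap logical_ids, PySem.Set.empty)
  let grouped := logical_ids.foldl (pvGroupB st.1) (PySem.Dict.mk [])
  let sorted_clusters := pvSortClusters (PySem.Dict.values grouped)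
  let assignments := (PySem.List.enumerate sorted_clusters 1).foldl
    (fun d ic => ic.2.foldl (fun d lid => PySem.Dict.insert d lid ic.1) d) (PySem.Dict.mk [])
  let normalized := PySem.Set.ofList (sorted_clusters.map (pvWinnerSel st.2))
  (assignments.items, normalized)

-- ===== PRECONDITION & SPEC =====
def Spec_derive_assignments_py (members : List (List (String × String))) (decision : List (String × List (String × String))) (out : (List (String × Int)) × List String) : Prop := out = derive_assignments_py_alt members decision
instance (members : List (List (String × String))) (decision : List (String × List (String × String))) (out : (List (String × Int)) × List String) : Decidable (Spec_derive_assignments_py members decision out) := by unfold Spec_derive_assignments_py; infer_instance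

-- ===== CLAIM (what is proved, stated in full; the proofs are below) =====
def Claim_equal_derive_assignments_py : Prop := ∀ (members : List (List (String × String))) (decision : List (String × List (String × String))), Dom_derive_assignments_py members decision → Spec_derive_assignments_py members decision (derive_assignments_py members decision)

-- ===== LEMMAS AND PROOFS =====

-- one parent-pointer step of the union-find forest (none = x is a root or absent)
def pvStep (p : PySem.Dict String String) (x : String) : Option String :=
  match PySem.Dict.get? p x with
  | some y => if y = x then none else some y
  | none => none

-- "x reaches root r along the node list l" in the parent forest
inductive pvRootedL (p : PySem.Dict String String) : String → String → List String → Prop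
  | root (x : String) : pvStep p x = none → pvRootedL p x x []
  | cons (x y r : String) (l : List String) :
      pvStep p x = some y → pvRootedL p y r l → pvRootedL p x r (y :: l)

def pvRooted (p : PySem.Dict String String) (x r : String) : Prop := ∃ l, pvRootedL p x r l

-- invariant of A's parent dict: unique keys, values are keys, every chain terminates
def pvInv (p : PySem.Dict String String) : Prop :=
  (PySem.Dict.keys p).Nodup ∧ (∀ kv ∈ p.items, kv.2 ∈ PySem.Dict.keys p) ∧
    (∀ x, ∃ r l, pvRootedL p x r l)

lemma pvRootedL_settled {p : PySem.Dict String String} {x r : String} {l : List String}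
    (h : pvRootedL p x r l) : pvStep p r = none := by
  induction h with
  | root _ h => exact h
  | cons _ _ _ _ _ _ ih => exact ih

lemma pvRootedL_det {p : PySem.Dict String String} {x r r' : String} {l l' : List String}
    (h : pvRootedL p x r l) (h' : pvRootedL p x r' l') : r = r' ∧ l = l' := by
  induction h generalizing r' l' with
  | root x hx =>
    cases h' with
    | root => exact ⟨rfl, rfl⟩
    | cons _ y _ _ hs _ => rw [hx] at hs; cases hs
  | cons x y r l hs ht ih =>
    cases h' with
    | root _ hx => rw [hx] at hs; cases hs
    | cons _ y' _ l'' hs' ht' =>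
      rw [hs] at hs'; injection hs' with hy; subst hy
      obtain ⟨h1, h2⟩ := ih ht'
      exact ⟨h1, by rw [h2]⟩

lemma pvRooted_det {p : PySem.Dict String String} {x r r' : String}
    (h : pvRooted p x r) (h' : pvRooted p x r') : r = r' := by
  obtain ⟨l, h⟩ := h; obtain ⟨l', h'⟩ := h'
  exact (pvRootedL_det h h').1

lemma pvRootedL_mem_tail {p : PySem.Dict String String} {x r : String} {l : List String}
    (h : pvRootedL p x r l) (hl : l ≠ []) : r ∈ l := by
  induction h with
  | root => exact absurd rfl hl
  | cons x y r l hs ht ih =>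
    cases l with
    | nil => cases ht with | root => exact List.mem_singleton.mpr rfl
    | cons a as => exact List.mem_cons_of_mem _ (ih (by simp))

lemma pvRootedL_suffix {p : PySem.Dict String String} {x r : String} {l : List String}
    (h : pvRootedL p x r l) : ∀ z ∈ l, ∃ l', pvRootedL p z r l' ∧ l'.length < l.length := by
  induction h with
  | root => intro z hz; cases hz
  | cons x y r l hs ht ih =>
    intro z hz
    rcases List.mem_cons.mp hz with hz | hz
    · exact ⟨l, hz ▸ ht, by simp⟩
    · obtain ⟨l', h1, h2⟩ := ih z hz
      exact ⟨l', h1, by simp; omega⟩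

lemma pvRootedL_nodup {p : PySem.Dict String String} {x r : String} {l : List String}
    (h : pvRootedL p x r l) : (x :: l).Nodup := by
  induction h with
  | root => simp
  | cons x y r l hs ht ih =>
    refine List.nodup_cons.mpr ⟨?_, ih⟩
    intro hx
    rcases List.mem_cons.mp hx with hx | hx
    · subst hx
      obtain ⟨_, h2⟩ := pvRootedL_det ht (pvRootedL.cons x x r l hs ht)
      have := congrArg List.length h2
      simp at this
    · obtain ⟨l', h1, h2⟩ := pvRootedL_suffix ht x hx
      obtain ⟨_, h3⟩ := pvRootedL_det h1 (pvRootedL.cons x y r l hs ht)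
      rw [h3] at h2; simp at h2

lemma pvRooted_settled {p : PySem.Dict String String} {x r : String}
    (h : pvRooted p x r) : pvStep p r = none := by
  obtain ⟨l, h⟩ := h; exact pvRootedL_settled h

lemma pvMem_keys_of_pvStep_some {p : PySem.Dict String String} {x y : String}
    (h : pvStep p x = some y) : x ∈ PySem.Dict.keys p := by
  unfold pvStep at h
  by_contra hx
  rw [← PySem.Dict.get?_eq_none_iff_not_mem_keys] at hx
  rw [hx] at h; cases h

lemma pvGet?_some_of_pvStep_some {p : PySem.Dict String String} {x y : String}
    (h : pvStep p x = some y) : PySem.Dict.get? p x = some y := by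
  unfold pvStep at h
  cases hg : PySem.Dict.get? p x with
  | none => rw [hg] at h; cases h
  | some w =>
    rw [hg] at h
    by_cases hw : w = x
    · simp [hw] at h
    · simp [hw] at h; simp [h]

lemma pvValue_mem_keys {p : PySem.Dict String String} (hInv : pvInv p) {x y : String}
    (h : PySem.Dict.get? p x = some y) : y ∈ PySem.Dict.keys p :=
  hInv.2.1 (x, y) (PySem.Dict.mem_items_of_get?_eq_some _ h)

lemma pvRootedL_root_mem_keys {p : PySem.Dict String String} (hInv : pvInv p)
    {x r : String} {l : List String} (h : pvRootedL p x r l)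
    (hx : x ∈ PySem.Dict.keys p) : r ∈ PySem.Dict.keys p := by
  induction h with
  | root => exact hx
  | cons x y r l hs ht ih =>
    exact ih (pvValue_mem_keys hInv (pvGet?_some_of_pvStep_some hs))

lemma pvRootedL_dropLast_step {p : PySem.Dict String String} {x r : String} {l : List String}
    (h : pvRootedL p x r l) : ∀ z ∈ (x :: l).dropLast, ∃ y, pvStep p z = some y := by
  induction h with
  | root => intro z hz; simp at hz
  | cons x y r l hs ht ih =>
    intro z hz
    rw [List.dropLast_cons₂] at hz
    rcases List.mem_cons.mp hz with hz | hz
    · exact ⟨y, hz ▸ hs⟩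
    · exact ih z hz

lemma pvChain_length_le {p : PySem.Dict String String}
    {x r : String} {l : List String} (h : pvRootedL p x r l) :
    l.length ≤ p.size := by
  have hsub : (x :: l).dropLast ⊆ PySem.Dict.keys p := by
    intro z hz
    obtain ⟨y, hy⟩ := pvRootedL_dropLast_step h z hz
    exact pvMem_keys_of_pvStep_some hy
  have hnd : (x :: l).dropLast.Nodup := (pvRootedL_nodup h).sublist (List.dropLast_sublist _)
  have := (hnd.subperm hsub).length_le
  simp [PySem.Dict.keys, PySem.Dict.size] at this ⊢
  omega
lemma pvStep_insert (p : PySem.Dict String String) (k w z : String) :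
    pvStep (PySem.Dict.insert p k w) z =
      if z = k then (if w = k then none else some w) else pvStep p z := by
  unfold pvStep
  rw [PySem.Dict.get?_insert]
  by_cases hz : z = k
  · subst hz
    by_cases hw : w = z <;> simp [hw]
  · simp [hz]

lemma pvKeys_insert_of_mem (p : PySem.Dict String String) {k : String} (w : String)
    (hk : k ∈ PySem.Dict.keys p) :
    (PySem.Dict.insert p k w).keys = PySem.Dict.keys p := by
  apply PySem.Dict.keys_insert_of_contains
  rwa [PySem.Dict.contains_iff_mem_keys]

-- redirecting one node to a settled target: the covering lemma for both path
-- compression (w = the root of k) and union (k itself a settled root)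
lemma pvRoots_insert (p : PySem.Dict String String) (hInv : pvInv p) (k w rk : String)
    (hk : k ∈ PySem.Dict.keys p) (hw : w ∈ PySem.Dict.keys p)
    (hws : pvStep p w = none) (hwk : w ≠ k)
    (hrk : pvRooted p k rk) (hcase : w = rk ∨ rk = k) :
    pvInv (PySem.Dict.insert p k w) ∧
    (PySem.Dict.insert p k w).keys = PySem.Dict.keys p ∧
    ∀ z s, pvRooted p z s →
      pvRooted (PySem.Dict.insert p k w) z (if s = k ∧ rk = k then w else s) := by
  set p' := PySem.Dict.insert p k w with hp'
  have hkeys : p'.keys = PySem.Dict.keys p := pvKeys_insert_of_mem p w hk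
  have hkw : pvRooted p' k w := by
    refine ⟨[w], pvRootedL.cons k w w [] ?_ (pvRootedL.root w ?_)⟩
    · rw [pvStep_insert, if_pos rfl, if_neg hwk]
    · rw [pvStep_insert, if_neg hwk]; exact hws
  have htrans : ∀ z s, pvRooted p z s →
      pvRooted p' z (if s = k ∧ rk = k then w else s) := by
    intro z s ⟨m, hm⟩
    induction hm with
    | root z hz =>
      by_cases hzk : z = k
      · subst hzk
        have : rk = z := pvRooted_det hrk ⟨[], pvRootedL.root z hz⟩
        simp [this]
        exact hkw
      · have : pvStep p' z = none := by rw [pvStep_insert, if_neg hzk]; exact hz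
        have hzz : z = k ∧ rk = k → False := fun h => hzk h.1
        rw [if_neg hzz]
        exact ⟨[], pvRootedL.root z this⟩
    | cons z y s m hs ht ih =>
      by_cases hzk : z = k
      · subst hzk
        -- z = k has a successor, so rk ≠ k and (hcase) w = rk = s
        have hrkne : rk ≠ z := by
          intro h
          have : pvStep p z = none := pvRooted_settled (h ▸ hrk)
          rw [this] at hs; cases hs
        have hsrk : s = rk := pvRooted_det ⟨y :: m, pvRootedL.cons z y s m hs ht⟩ hrk
        have hwrk : w = rk := hcase.resolve_right hrkne
        rw [if_neg (by intro h; exact hrkne h.2)]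
        rw [hsrk, ← hwrk]
        exact hkw
      · have hs' : pvStep p' z = some y := by rw [pvStep_insert, if_neg hzk]; exact hs
        obtain ⟨m', hm'⟩ := ih
        exact ⟨y :: m', pvRootedL.cons z y _ m' hs' hm'⟩
  refine ⟨⟨?_, ?_, ?_⟩, hkeys, htrans⟩
  · rw [hkeys]; exact hInv.1
  · intro kv hkv
    rcases (PySem.Dict.mem_items_insert p k w kv).mp hkv with h | h
    · rw [h, hkeys]; exact hw
    · rw [hkeys]; exact hInv.2.1 kv h.1
  · intro x
    obtain ⟨r, l, hl⟩ := hInv.2.2 x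
    obtain ⟨m', hm'⟩ := htrans x r ⟨l, hl⟩
    exact ⟨_, m', hm'⟩
lemma pvGet?_some_of_mem_keys {p : PySem.Dict String String} {x : String}
    (hx : x ∈ PySem.Dict.keys p) : ∃ y, PySem.Dict.get? p x = some y := by
  cases hg : PySem.Dict.get? p x with
  | none => rw [PySem.Dict.get?_eq_none_iff_not_mem_keys] at hg; exact absurd hx hg
  | some y => exact ⟨y, rfl⟩

lemma pvSetdefault_self {p : PySem.Dict String String} {x : String}
    (hx : x ∈ PySem.Dict.keys p) : PySem.Dict.setdefault p x x = p := by
  apply PySem.Dict.setdefault_of_contains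
  rwa [PySem.Dict.contains_iff_mem_keys]

lemma pvFindA_spec : ∀ (l : List String) (fuel : Nat) (p : PySem.Dict String String),
    pvInv p → ∀ x r, x ∈ PySem.Dict.keys p → pvRootedL p x r l → l.length < fuel →
    ∃ p', pvFindA fuel p x = (r, p') ∧ pvInv p' ∧ p'.keys = PySem.Dict.keys p ∧
      (∀ z s, pvRooted p z s → pvRooted p' z s) := by
  intro l
  induction l with
  | nil =>
    intro fuel p hInv x r hx hR hf
    obtain ⟨fuel, rfl⟩ : ∃ f, fuel = f + 1 := ⟨fuel - 1, by omega⟩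
    cases hR with
    | root _ hroot =>
      obtain ⟨y, hy⟩ := pvGet?_some_of_mem_keys hx
      have hyx : y = x := by
        unfold pvStep at hroot; rw [hy] at hroot
        by_cases h : y = x
        · exact h
        · simp [h] at hroot
      subst hyx
      refine ⟨p, ?_, hInv, rfl, fun z s h => h⟩
      simp [pvFindA, hy, pvSetdefault_self hx]
  | cons y l ih =>
    intro fuel p hInv x r hx hR hf
    obtain ⟨fuel, rfl⟩ : ∃ f, fuel = f + 1 := ⟨fuel - 1, by omega⟩
    cases hR with
    | cons _ _ _ _ hs ht =>
      have hy : PySem.Dict.get? p x = some y := pvGet?_some_of_pvStep_some hs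
      have hyx : y ≠ x := by
        intro h; simp [pvStep, hy, h] at hs
      have hymem : y ∈ PySem.Dict.keys p := pvValue_mem_keys hInv hy
      obtain ⟨pm, hcall, hInvm, hkeysm, hrootsm⟩ :=
        ih fuel p hInv y r hymem ht (by simp at hf; omega)
      -- facts about r
      have hrkeys : r ∈ PySem.Dict.keys p :=
        pvRootedL_root_mem_keys hInv (pvRootedL.cons x y r l hs ht) hx
      have hrsettled : pvStep p r = none := pvRootedL_settled ht
      have hrootedpr : pvRooted pm r r :=
        hrootsm r r ⟨[], pvRootedL.root r hrsettled⟩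
      have hrsettledm : pvStep pm r = none := pvRooted_settled hrootedpr
      have hrx : r ≠ x := by
        have hmem : r ∈ y :: l := pvRootedL_mem_tail (pvRootedL.cons x y r l hs ht) (by simp)
        have hnd := pvRootedL_nodup (pvRootedL.cons x y r l hs ht)
        rw [List.nodup_cons] at hnd
        intro h; exact hnd.1 (h ▸ hmem)
      have hrootedmx : pvRooted pm x r := by
        obtain ⟨m, hm⟩ := hrootsm x r ⟨y :: l, pvRootedL.cons x y r l hs ht⟩
        exact ⟨m, hm⟩
      obtain ⟨hInv2, hkeys2, hroots2⟩ :=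
        pvRoots_insert pm hInvm x r r (hkeysm ▸ hx) (hkeysm ▸ hrkeys) hrsettledm hrx
          hrootedmx (Or.inl rfl)
      refine ⟨PySem.Dict.insert pm x r, ?_, hInv2, by rw [hkeys2, hkeysm], ?_⟩
      · show pvFindA (fuel + 1) p x = _
        simp only [pvFindA, hy, Option.getD_some, pvSetdefault_self hx]
        rw [if_neg hyx, hcall]
        simp [PySem.Dict.get?_insert_self]
      · intro z s hzs
        have h1 := hrootsm z s hzs
        have h2 := hroots2 z s h1
        rwa [if_neg (by intro h; exact hrx h.2)] at h2

lemma pvFind_spec (p : PySem.Dict String String) (hInv : pvInv p) (x : String)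
    (hx : x ∈ PySem.Dict.keys p) :
    ∃ r p', pvFind p x = (r, p') ∧ pvRooted p x r ∧ pvInv p' ∧
      p'.keys = PySem.Dict.keys p ∧ (∀ z s, pvRooted p z s → pvRooted p' z s) := by
  obtain ⟨r, l, hl⟩ := hInv.2.2 x
  have hlen : l.length < p.size + 1 := Nat.lt_succ_of_le (pvChain_length_le hl)
  obtain ⟨p', h1, h2, h3, h4⟩ := pvFindA_spec l (p.size + 1) p hInv x r hx hl hlen
  exact ⟨r, p', h1, ⟨l, hl⟩, h2, h3, h4⟩

lemma pvUnion_spec (p : PySem.Dict String String) (hInv : pvInv p) (a b ra rb : String)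
    (ha : a ∈ PySem.Dict.keys p) (hb : b ∈ PySem.Dict.keys p)
    (hra : pvRooted p a ra) (hrb : pvRooted p b rb) :
    ∃ p', pvUnion p a b = p' ∧ pvInv p' ∧ p'.keys = PySem.Dict.keys p ∧
      ∀ z s, pvRooted p z s → pvRooted p' z (if s = rb then ra else s) := by
  obtain ⟨r1, p1, hfind1, hroot1, hInv1, hkeys1, hroots1⟩ := pvFind_spec p hInv a ha
  have hr1 : r1 = ra := pvRooted_det hroot1 hra
  rw [hr1] at hfind1 hroot1
  obtain ⟨r2, p2, hfind2, hroot2, hInv2, hkeys2, hroots2⟩ :=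
    pvFind_spec p1 hInv1 b (hkeys1 ▸ hb)
  have hr2 : r2 = rb := pvRooted_det hroot2 (hroots1 b rb hrb)
  rw [hr2] at hfind2 hroot2
  have hkeys21 : p2.keys = PySem.Dict.keys p := by rw [hkeys2, hkeys1]
  have hroots21 : ∀ z s, pvRooted p z s → pvRooted p2 z s :=
    fun z s h => hroots2 z s (hroots1 z s h)
  by_cases hab : ra = rb
  · refine ⟨p2, ?_, hInv2, hkeys21, ?_⟩
    · unfold pvUnion; rw [hfind1]; simp only []; rw [hfind2, if_pos hab]
    · intro z s h
      by_cases hsrb : s = rb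
      · rw [if_pos hsrb, hab, ← hsrb]; exact hroots21 z s h
      · rw [if_neg hsrb]; exact hroots21 z s h
  · -- parent[right_root] = left_root
    have hrbmem : rb ∈ PySem.Dict.keys p := by
      obtain ⟨lb, hlb⟩ := hrb; exact pvRootedL_root_mem_keys hInv hlb hb
    have hramem : ra ∈ PySem.Dict.keys p := by
      obtain ⟨la, hla⟩ := hra; exact pvRootedL_root_mem_keys hInv hla ha
    have hrasettled : pvStep p2 ra = none :=
      pvRooted_settled (hroots21 ra ra ⟨[], pvRootedL.root ra (pvRooted_settled hra)⟩)
    have hrbrooted : pvRooted p2 rb rb :=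
      hroots21 rb rb ⟨[], pvRootedL.root rb (pvRooted_settled hrb)⟩
    obtain ⟨hInv3, hkeys3, hroots3⟩ :=
      pvRoots_insert p2 hInv2 rb ra rb (hkeys21 ▸ hrbmem) (hkeys21 ▸ hramem)
        hrasettled hab hrbrooted (Or.inr rfl)
    refine ⟨PySem.Dict.insert p2 rb ra, ?_, hInv3, by rw [hkeys3, hkeys21], ?_⟩
    · unfold pvUnion; rw [hfind1]; simp only []; rw [hfind2, if_neg hab]
    · intro z s h
      have h2 := hroots3 z s (hroots21 z s h)
      by_cases hsrb : s = rb
      · rw [if_pos (show s = rb ∧ rb = rb from ⟨hsrb, rfl⟩)] at h2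
        rw [if_pos hsrb]; exact h2
      · rw [if_neg (show ¬(s = rb ∧ rb = rb) from fun hh => hsrb hh.1)] at h2
        rw [if_neg hsrb]; exact h2
lemma pvInitMap_get? (lids : List String) (x : String) :
    PySem.Dict.get? (pvInitMap lids) x = if x ∈ lids then some x else none := by
  unfold pvInitMap
  induction lids using List.reverseRecOn with
  | nil => rfl
  | append_singleton l a ih =>
    rw [List.foldl_append]
    simp only [List.foldl_cons, List.foldl_nil]
    rw [PySem.Dict.get?_insert]
    by_cases hx : x = a
    · simp [hx]
    · rw [if_neg hx, ih]
      simp [hx]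

lemma pvInitMap_keys (lids : List String) :
    (pvInitMap lids).keys = PySem.Set.ofList lids := by
  unfold pvInitMap
  rw [PySem.Dict.keys_foldl_insert]
  simp [PySem.Set.update_nil_left]

lemma pvInitMap_step (lids : List String) (x : String) : pvStep (pvInitMap lids) x = none := by
  unfold pvStep
  rw [pvInitMap_get?]
  by_cases hx : x ∈ lids <;> simp [hx]

lemma pvInitMap_inv (lids : List String) : pvInv (pvInitMap lids) := by
  refine ⟨?_, ?_, ?_⟩
  · rw [pvInitMap_keys]; exact PySem.Set.nodup_ofList lids
  · intro kv hkv
    have hnd : (pvInitMap lids).keys.Nodup := by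
      rw [pvInitMap_keys]; exact PySem.Set.nodup_ofList lids
    have hkv' : (kv.1, kv.2) ∈ (pvInitMap lids).items := by simpa using hkv
    have := PySem.Dict.get?_of_mem_items _ hkv' hnd
    rw [pvInitMap_get?] at this
    by_cases h : kv.1 ∈ lids
    · rw [if_pos h] at this
      injection this with h2
      rw [← h2, pvInitMap_keys]
      exact (PySem.Set.mem_ofList _ _).mpr h
    · rw [if_neg h] at this; cases this
  · intro x
    exact ⟨x, [], pvRootedL.root x (pvInitMap_step lids x)⟩

-- dict comprehension over items with f applied to the values: lookup commutes with f
lemma pvGet?_mapVal (items : List (String × String)) (f : String → String) (x : String) :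
    PySem.Dict.get? (PySem.Dict.mk (items.map (fun kv => (kv.1, f kv.2)))) x =
      (PySem.Dict.get? (PySem.Dict.mk items) x).map f := by
  induction items with
  | nil => rfl
  | cons kv rest ih =>
    simp only [List.map_cons]
    rw [PySem.Dict.get?_mk_cons, PySem.Dict.get?_mk_cons]
    by_cases h : kv.1 == x
    · simp [h]
    · simp only [h]; simpa using ih

-- the joint invariant carried through the alias loop
def pvEdgeInv (p rep : PySem.Dict String String) : Prop :=
  pvInv p ∧ rep.keys = p.keys ∧
    ∀ x ∈ p.keys, ∃ v, PySem.Dict.get? rep x = some v ∧ pvRooted p x v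

lemma pvEdge_fold : ∀ (es : List (String × String)) (p rep : PySem.Dict String String)
    (w : PySem.Set String), pvEdgeInv p rep →
    (es.foldl pvEdgeA (p, w)).2 = (es.foldl pvEdgeB (rep, w)).2 ∧
    pvEdgeInv (es.foldl pvEdgeA (p, w)).1 (es.foldl pvEdgeB (rep, w)).1 ∧
    (es.foldl pvEdgeA (p, w)).1.keys = PySem.Dict.keys p := by
  intro es
  induction es with
  | nil => intro p rep w h; exact ⟨rfl, h, rfl⟩
  | cons e es ih =>
    intro p rep w h
    obtain ⟨hInv, hkeys, hrep⟩ := h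
    have hcontains : ∀ x, PySem.Dict.contains p x = PySem.Dict.contains rep x := by
      intro x
      rw [PySem.Dict.contains_eq_decide_mem_keys, PySem.Dict.contains_eq_decide_mem_keys, hkeys]
    by_cases hg : PySem.Dict.contains p e.1 && PySem.Dict.contains p e.2
    · have hg' : e.1 ∈ PySem.Dict.keys p ∧ e.2 ∈ PySem.Dict.keys p := by
        simpa [Bool.and_eq_true, PySem.Dict.contains_iff_mem_keys] using hg
      obtain ⟨vl, hvl, hrl⟩ := hrep e.1 hg'.1
      obtain ⟨vr, hvr, hrr⟩ := hrep e.2 hg'.2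
      obtain ⟨p', hun, hInv', hkeys', hroots'⟩ :=
        pvUnion_spec p hInv e.1 e.2 vl vr hg'.1 hg'.2 hrl hrr
      set rep' := if vl = vr then rep else
          PySem.Dict.mk (rep.items.map (fun kv => (kv.1, if kv.2 = vr then vl else kv.2))) with hrep'
      have hstepA : pvEdgeA (p, w) e = (p', PySem.Set.add w e.2) := by
        unfold pvEdgeA; simp only []; rw [if_pos hg, hun]
      have hstepB : pvEdgeB (rep, w) e = (rep', PySem.Set.add w e.2) := by
        unfold pvEdgeB; simp only []
        rw [← hcontains e.1, ← hcontains e.2, if_pos hg]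
        rw [PySem.Dict.getD_of_get?_eq_some _ "" hvl, PySem.Dict.getD_of_get?_eq_some _ "" hvr]
      have harg : pvEdgeInv p' rep' := by
        by_cases hv : vl = vr
        · rw [hrep', if_pos hv]
          refine ⟨hInv', by rw [hkeys, hkeys'], ?_⟩
          intro x hx
          rw [hkeys'] at hx
          obtain ⟨v, hv1, hv2⟩ := hrep x hx
          refine ⟨v, hv1, ?_⟩
          have := hroots' x v hv2
          by_cases hvv : v = vr
          · rwa [if_pos hvv, hv, ← hvv] at this
          · rwa [if_neg hvv] at this
        · rw [hrep', if_neg hv]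
          refine ⟨hInv', ?_, ?_⟩
          · show (PySem.Dict.mk _).keys = _
            rw [hkeys', ← hkeys]
            show (rep.items.map _).map Prod.fst = _
            rw [List.map_map]
            rfl
          · intro x hx
            rw [hkeys'] at hx
            obtain ⟨v, hv1, hv2⟩ := hrep x hx
            refine ⟨if v = vr then vl else v, ?_, hroots' x v hv2⟩
            have hmk : PySem.Dict.mk rep.items = rep := rfl
            rw [pvGet?_mapVal rep.items (fun v => if v = vr then vl else v) x, hmk, hv1]
            rfl
      obtain ⟨ih1, ih2, ih3⟩ := ih p' rep' (PySem.Set.add w e.2) harg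
      rw [List.foldl_cons, List.foldl_cons, hstepA, hstepB]
      exact ⟨ih1, ih2, by rw [ih3, hkeys']⟩
    · have hstepA : pvEdgeA (p, w) e = (p, w) := by
        unfold pvEdgeA; simp only []; rw [if_neg hg]
      have hstepB : pvEdgeB (rep, w) e = (rep, w) := by
        unfold pvEdgeB; simp only []; rw [← hcontains e.1, ← hcontains e.2, if_neg hg]
      rw [List.foldl_cons, List.foldl_cons, hstepA, hstepB]
      exact ih p rep w ⟨hInv, hkeys, hrep⟩

lemma pvGroup_fold : ∀ (lids : List String) (p rep : PySem.Dict String String)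
    (g : PySem.Dict String (List String)),
    pvInv p → (∀ x ∈ lids, x ∈ PySem.Dict.keys p) →
    (∀ x ∈ PySem.Dict.keys p, ∃ v, PySem.Dict.get? rep x = some v ∧ pvRooted p x v) →
    (lids.foldl pvGroupA (p, g)).2 = lids.foldl (pvGroupB rep) g := by
  intro lids
  induction lids with
  | nil => intro p rep g _ _ _; rfl
  | cons lid lids ih =>
    intro p rep g hInv hmem hrep
    have hlid : lid ∈ PySem.Dict.keys p := hmem lid (by simp)
    obtain ⟨v, hv1, hv2⟩ := hrep lid hlid
    obtain ⟨r, p', hfind, hroot, hInv', hkeys', hroots'⟩ := pvFind_spec p hInv lid hlid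
    have hrv : r = v := pvRooted_det hroot hv2
    simp only [List.foldl_cons]
    unfold pvGroupA pvGroupB
    simp only [hfind]
    rw [hrv, PySem.Dict.getD_of_get?_eq_some _ "" hv1]
    apply ih p' rep _ hInv'
    · intro x hx; rw [hkeys']; exact hmem x (by simp [hx])
    · intro x hx
      rw [hkeys'] at hx
      obtain ⟨u, hu1, hu2⟩ := hrep x hx
      exact ⟨u, hu1, hroots' x u hu2⟩

lemma pvTail_fold (W : PySem.Set String) : ∀ (cl : List (List String))
    (d : PySem.Dict String Int) (s : PySem.Set String) (i : Int),
    cl.foldl (pvTailA W) (d, s, i) =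
      ((PySem.List.enumerate cl i).foldl
        (fun d ic => ic.2.foldl (fun d lid => PySem.Dict.insert d lid ic.1) d) d,
       cl.foldl (fun s c => PySem.Set.add s (pvWinnerSel W c)) s, i + cl.length) := by
  intro cl
  induction cl with
  | nil => intro d s i; simp [PySem.List.enumerate_nil]
  | cons c cl ih =>
    intro d s i
    have hstep : pvTailA W (d, s, i) c =
        (c.foldl (fun d lid => PySem.Dict.insert d lid i) d,
         PySem.Set.add s (pvWinnerSel W c), i + 1) := rfl
    rw [List.foldl_cons, hstep, ih, PySem.List.enumerate_cons, List.foldl_cons]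
    refine congrArg _ (congrArg _ ?_)
    simp only [List.length_cons]
    push_cast
    ring

-- ===== VERDICT (by name: the statement is the Claim_ definition above) =====
theorem derive_assignments_py_spec : Claim_equal_derive_assignments_py := by
  intro members decision _
  unfold Spec_derive_assignments_py derive_assignments_py derive_assignments_py_alt
  simp only []
  set lids := pvLogicalIds members with hlids
  set al := pvAliases decision with hal
  set p0 := pvInitMap lids with hp0
  have hinv0 : pvEdgeInv p0 p0 := by
    refine ⟨pvInitMap_inv lids, rfl, ?_⟩
    intro x hx
    rw [hp0, pvInitMap_keys] at hx
    have hxl : x ∈ lids := (PySem.Set.mem_ofList _ _).mp hx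
    refine ⟨x, ?_, ⟨[], pvRootedL.root x (pvInitMap_step lids x)⟩⟩
    rw [pvInitMap_get?, if_pos hxl]
  obtain ⟨hw, hEdge, hkeysA⟩ := pvEdge_fold al.items p0 p0 PySem.Set.empty hinv0
  set stA := al.items.foldl pvEdgeA (p0, PySem.Set.empty) with hstA
  set stB := al.items.foldl pvEdgeB (p0, PySem.Set.empty) with hstB
  have hgroup : (lids.foldl pvGroupA (stA.1, PySem.Dict.mk [])).2 =
      lids.foldl (pvGroupB stB.1) (PySem.Dict.mk []) := by
    refine pvGroup_fold lids stA.1 stB.1 (PySem.Dict.mk []) hEdge.1 ?_ ?_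
    · intro x hx
      rw [hkeysA, hp0, pvInitMap_keys]
      exact (PySem.Set.mem_ofList _ _).mpr hx
    · exact hEdge.2.2
  rw [pvTail_fold, hgroup, hw]
  refine Prod.ext ?_ ?_
  · rfl
  · show _ = PySem.Set.ofList _
    rw [← PySem.Set.update_nil_left, PySem.Set.update_map_eq_foldl_add]
    rfl
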